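-- pv_equiv track=rewrite | github.com/KB-F-2023/kelompok-keluarga-buatan | Tugas 3/8Queens Hill Climb Unoptimized.py | choose_best_successor
-- ===== SOURCE A (Python) =====
-- def calculate_conflicts(state):
--     n = len(state)
--     conflicts = 0
--     for i in range(n):
--         for j in range(i + 1, n):
--             if state[i] == state[j] or i - state[i] == j - state[j] or i + state[i] == j + state[j]:
--                 conflicts += 1
--     return conflicts
--
-- def choose_best_successor(successors):
--     n = len(successors[0])
--     min_conflicts = calculate_conflicts(successors[0])
--     best_successor = successors[0]
--     for successor in successors[1:]:
--         conflicts = calculate_conflicts(successor)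
--         if conflicts < min_conflicts:
--             min_conflicts = conflicts
--             best_successor = successor
--     return best_successor
-- ===== SOURCE B (Python) =====
-- def calculate_conflicts_fast(state):
--     cols = {}
--     diag = {}
--     anti = {}
--     total = 0
--     for i, c in enumerate(state):
--         total += cols.get(c, 0) + diag.get(i - c, 0) + anti.get(i + c, 0)
--         cols[c] = cols.get(c, 0) + 1
--         diag[i - c] = diag.get(i - c, 0) + 1
--         anti[i + c] = anti.get(i + c, 0) + 1
--     return total
--
-- def choose_best_successor(successors):
--     return min(successors, key=calculate_conflicts_fast)
-- ===== Notes on version B (the rewrite author's own statement) =====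
-- stated objective: faster
-- what changed: Conflicts are counted in one O(n) pass per board with column/diagonal/anti-diagonal tally dictionaries (each queen adds the number of earlier queens sharing its line) instead of comparing all O(n^2) pairs, and the best board is picked with min(key=...); the three collision conditions are mutually exclusive for distinct rows, so the tally sum equals the pair count exactly.
import Mathlib
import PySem

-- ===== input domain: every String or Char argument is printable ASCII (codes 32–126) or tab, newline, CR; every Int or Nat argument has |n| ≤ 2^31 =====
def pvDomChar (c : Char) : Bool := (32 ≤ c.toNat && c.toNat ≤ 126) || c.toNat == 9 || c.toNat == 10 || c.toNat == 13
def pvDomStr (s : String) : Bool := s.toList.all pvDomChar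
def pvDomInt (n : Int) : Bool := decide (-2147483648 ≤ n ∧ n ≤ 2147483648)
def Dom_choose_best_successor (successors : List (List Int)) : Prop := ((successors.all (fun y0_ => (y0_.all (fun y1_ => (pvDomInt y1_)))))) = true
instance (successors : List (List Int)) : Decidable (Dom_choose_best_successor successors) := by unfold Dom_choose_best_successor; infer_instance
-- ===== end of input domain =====

-- B replaces A's all-pairs O(m·n²) conflict count by an O(m·n) one-pass tally of columns/diagonals
-- and picks the best board with min(key=...); asymptotically faster, same value.

-- ===== PORT A =====
def calculate_conflicts (state : List Int) : Int :=
  let n : Int := state.length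
  (PySem.List.pyRange 0 n 1).foldl (fun conflicts i =>
    (PySem.List.pyRange (i + 1) n 1).foldl (fun conflicts j =>
      if PySem.List.pyGetD state i 0 = PySem.List.pyGetD state j 0 ∨
         i - PySem.List.pyGetD state i 0 = j - PySem.List.pyGetD state j 0 ∨
         i + PySem.List.pyGetD state i 0 = j + PySem.List.pyGetD state j 0
      then conflicts + 1 else conflicts) conflicts) 0

def choose_best_successor (successors : List (List Int)) : List Int :=
  let first := PySem.List.pyGetD successors 0 []
  let _n : Int := first.length   -- Python computes n = len(successors[0]) but never uses it
  ((PySem.List.slice successors (some 1) none).foldl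
    (fun st succ =>
      let conflicts := calculate_conflicts succ
      if conflicts < st.1 then (conflicts, succ) else st)
    (calculate_conflicts first, first)).2

-- ===== PORT B =====
def calculate_conflicts_fast (state : List Int) : Int :=
  ((PySem.List.enumerate state 0).foldl
    (fun st p =>
      let total := st.2.2.2 + st.1.getD p.2 0 + st.2.1.getD (p.1 - p.2) 0 + st.2.2.1.getD (p.1 + p.2) 0
      (st.1.insert p.2 (st.1.getD p.2 0 + 1),
       st.2.1.insert (p.1 - p.2) (st.2.1.getD (p.1 - p.2) 0 + 1),
       st.2.2.1.insert (p.1 + p.2) (st.2.2.1.getD (p.1 + p.2) 0 + 1),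
       total))
    (PySem.Dict.empty, PySem.Dict.empty, PySem.Dict.empty, 0)).2.2.2

def choose_best_successor_alt (successors : List (List Int)) : List Int :=
  (PySem.List.min? successors calculate_conflicts_fast).getD []

-- ===== PRECONDITION & SPEC =====
-- Pre_ excludes only the empty list, on which A raises IndexError (successors[0]).
def Pre_choose_best_successor (successors : List (List Int)) : Prop := successors ≠ []
instance (successors : List (List Int)) : Decidable (Pre_choose_best_successor successors) := by unfold Pre_choose_best_successor; infer_instance

def pvWitness_choose_best_successor : List (List Int) := [[0, 2, 1], [1, 3, 0]]

def Spec_choose_best_successor (successors : List (List Int)) (out : List Int) : Prop := out = choose_best_successor_alt successors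
instance (successors : List (List Int)) (out : List Int) : Decidable (Spec_choose_best_successor successors out) := by unfold Spec_choose_best_successor; infer_instance

-- ===== CLAIM (what is proved, stated in full; the proofs are below) =====
def Claim_equal_choose_best_successor : Prop := ∀ (successors : List (List Int)), Dom_choose_best_successor successors → Pre_choose_best_successor successors → Spec_choose_best_successor successors (choose_best_successor successors)

-- ===== LEMMAS AND PROOFS =====

-- number of the three line-sharing conditions that hold between two (row, column) pairs
def sInd (p q : Int × Int) : Int :=
  (if p.2 = q.2 then 1 else 0) + (if p.1 - p.2 = q.1 - q.2 then 1 else 0) +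
  (if p.1 + p.2 = q.1 + q.2 then 1 else 0)

-- A's 0/1 indicator: does any of the three conditions hold
def oInd (p q : Int × Int) : Int :=
  if p.2 = q.2 ∨ p.1 - p.2 = q.1 - q.2 ∨ p.1 + p.2 = q.1 + q.2 then 1 else 0

-- head-versus-rest pair sums
def Osum : List (Int × Int) → Int
  | [] => 0
  | e :: es => (es.map (oInd e)).sum + Osum es

def Ssum : List (Int × Int) → Int
  | [] => 0
  | e :: es => (es.map (sInd e)).sum + Ssum es

-- B's running total: each element counted against the tallies of everything before it
def Bs : List Int → List Int → List Int → List (Int × Int) → Int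
  | _, _, _, [] => 0
  | c, d, e, p :: es =>
      (c.count p.2 : Int) + (d.count (p.1 - p.2) : Int) + (e.count (p.1 + p.2) : Int) +
      Bs (c ++ [p.2]) (d ++ [p.1 - p.2]) (e ++ [p.1 + p.2]) es

-- distinct rows make the three conditions mutually exclusive
lemma oInd_eq_sInd {p q : Int × Int} (h : p.1 ≠ q.1) : oInd p q = sInd p q := by
  obtain ⟨a, b⟩ := p; obtain ⟨c, d⟩ := q
  simp only [oInd, sInd] at *
  split_ifs <;> omega

lemma Osum_eq_Ssum : ∀ (E : List (Int × Int)), E.Pairwise (fun p q => p.1 < q.1) → Osum E = Ssum E := by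
  intro E h
  induction E with
  | nil => rfl
  | cons e es ih =>
    rcases List.pairwise_cons.mp h with ⟨h1, h2⟩
    simp only [Osum, Ssum, ih h2]
    congr 1
    apply congrArg
    apply List.map_congr_left
    intro q hq
    exact oInd_eq_sInd (ne_of_lt (h1 q hq))

lemma Bs_eq_cross_add_Ssum : ∀ (es : List (Int × Int)) (c d e : List Int),
    Bs c d e es =
      (es.map (fun q => (c.count q.2 : Int) + (d.count (q.1 - q.2) : Int) + (e.count (q.1 + q.2) : Int))).sum
      + Ssum es := by
  intro es
  induction es with
  | nil => intro c d e; simp [Bs, Ssum]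
  | cons p es ih =>
    intro c d e
    simp only [Bs, Ssum, ih, List.map_cons, List.sum_cons]
    have hc : ∀ (l : List Int) (v x : Int),
        (((l ++ [v]).count x : Int)) = (l.count x : Int) + (if v = x then 1 else 0) := by
      intro l v x
      rw [List.count_append]
      simp [List.count_singleton, beq_iff_eq]
    have : (es.map (fun q => (((c ++ [p.2]).count q.2 : Int)) + (((d ++ [p.1 - p.2]).count (q.1 - q.2) : Int)) + (((e ++ [p.1 + p.2]).count (q.1 + q.2) : Int)))).sum
        = (es.map (fun q => (c.count q.2 : Int) + (d.count (q.1 - q.2) : Int) + (e.count (q.1 + q.2) : Int))).sum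
          + (es.map (sInd p)).sum := by
      rw [← List.sum_map_add]
      apply congrArg
      apply List.map_congr_left
      intro q _
      simp only [hc, sInd]
      ring
    rw [this]
    ring

-- one step of B's insert-counter loop is appending to the counted key list
lemma counter_insert_step (c : List Int) (v : Int) :
    (PySem.Dict.counter c).insert v ((PySem.Dict.counter c).getD v 0 + 1) = PySem.Dict.counter (c ++ [v]) := by
  rw [← PySem.Dict.foldl_insert_getD_add_one_eq_counter, ← PySem.Dict.foldl_insert_getD_add_one_eq_counter,
      List.foldl_append]
  rfl

lemma foldB_counters : ∀ (es : List (Int × Int)) (c d e : List Int) (t : Int),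
    es.foldl
      (fun st p =>
        let total := st.2.2.2 + st.1.getD p.2 0 + st.2.1.getD (p.1 - p.2) 0 + st.2.2.1.getD (p.1 + p.2) 0
        (st.1.insert p.2 (st.1.getD p.2 0 + 1),
         st.2.1.insert (p.1 - p.2) (st.2.1.getD (p.1 - p.2) 0 + 1),
         st.2.2.1.insert (p.1 + p.2) (st.2.2.1.getD (p.1 + p.2) 0 + 1),
         total))
      (PySem.Dict.counter c, PySem.Dict.counter d, PySem.Dict.counter e, t)
    = (PySem.Dict.counter (c ++ es.map (·.2)),
       PySem.Dict.counter (d ++ es.map (fun p => p.1 - p.2)),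
       PySem.Dict.counter (e ++ es.map (fun p => p.1 + p.2)),
       t + Bs c d e es) := by
  intro es
  induction es with
  | nil => intro c d e t; simp [Bs]
  | cons p es ih =>
    intro c d e t
    simp only [List.foldl_cons]
    rw [counter_insert_step, counter_insert_step, counter_insert_step]
    rw [ih]
    simp only [PySem.Dict.getD_counter, List.map_cons, Bs, List.append_assoc, List.singleton_append,
      Prod.mk.injEq]
    refine ⟨trivial, trivial, trivial, ?_⟩
    ring

lemma fast_eq_Ssum (s : List Int) : calculate_conflicts_fast s = Ssum (PySem.List.enumerate s 0) := by
  unfold calculate_conflicts_fast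
  have h0 : (PySem.Dict.empty : PySem.Dict Int Int) = PySem.Dict.counter ([] : List Int) := rfl
  rw [h0, foldB_counters]
  rw [Bs_eq_cross_add_Ssum]
  simp

-- A's nested index loops as a head-versus-rest sum over any range map
lemma osum_range (q : Int → Int × Int) : ∀ (n : Nat) (a b : Int), (b - a).toNat = n →
    ((PySem.List.pyRange a b 1).map
      (fun i => ((PySem.List.pyRange (i + 1) b 1).map (fun j => oInd (q i) (q j))).sum)).sum
    = Osum ((PySem.List.pyRange a b 1).map q) := by
  intro n
  induction n with
  | zero =>
    intro a b h
    have hba : b ≤ a := by omega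
    rw [PySem.List.pyRange_one_eq_nil hba]
    rfl
  | succ n ih =>
    intro a b h
    have hab : a < b := by omega
    rw [PySem.List.pyRange_one_cons hab]
    simp only [List.map_cons, List.sum_cons, Osum, List.map_map]
    rw [ih (a + 1) b (by omega)]
    rfl

lemma A_eq_Osum (s : List Int) :
    calculate_conflicts s =
      Osum ((PySem.List.pyRange 0 (s.length : Int) 1).map (fun j => (j, PySem.List.pyGetD s j 0))) := by
  unfold calculate_conflicts
  have hinner : ∀ (acc i : Int),
      (PySem.List.pyRange (i + 1) (s.length : Int) 1).foldl (fun conflicts j =>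
        if PySem.List.pyGetD s i 0 = PySem.List.pyGetD s j 0 ∨
           i - PySem.List.pyGetD s i 0 = j - PySem.List.pyGetD s j 0 ∨
           i + PySem.List.pyGetD s i 0 = j + PySem.List.pyGetD s j 0
        then conflicts + 1 else conflicts) acc
      = acc + ((PySem.List.pyRange (i + 1) (s.length : Int) 1).map
          (fun j => oInd (i, PySem.List.pyGetD s i 0) (j, PySem.List.pyGetD s j 0))).sum := by
    intro acc i
    rw [PySem.List.foldl_congr_mem (g := fun conflicts j =>
      conflicts + oInd (i, PySem.List.pyGetD s i 0) (j, PySem.List.pyGetD s j 0))]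
    · exact PySem.List.foldl_add _ _ _
    · intro acc' j _
      simp only [oInd]
      split_ifs <;> omega
  calc ((PySem.List.pyRange 0 (s.length : Int) 1).foldl (fun conflicts i =>
          (PySem.List.pyRange (i + 1) (s.length : Int) 1).foldl _ conflicts) 0)
      = ((PySem.List.pyRange 0 (s.length : Int) 1).foldl (fun conflicts i =>
          conflicts + ((PySem.List.pyRange (i + 1) (s.length : Int) 1).map
            (fun j => oInd (i, PySem.List.pyGetD s i 0) (j, PySem.List.pyGetD s j 0))).sum) 0) := by
        apply PySem.List.foldl_congr_mem
        intro acc i _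
        exact hinner acc i
    _ = 0 + ((PySem.List.pyRange 0 (s.length : Int) 1).map (fun i =>
          ((PySem.List.pyRange (i + 1) (s.length : Int) 1).map
            (fun j => oInd (i, PySem.List.pyGetD s i 0) (j, PySem.List.pyGetD s j 0))).sum)).sum :=
        PySem.List.foldl_add _ _ _
    _ = _ := by
        rw [zero_add, osum_range (fun j => (j, PySem.List.pyGetD s j 0)) ((s.length : Int) - 0).toNat 0 (s.length : Int) rfl]

-- the central fact: the two conflict counters agree on every board
lemma conf_eq (s : List Int) : calculate_conflicts s = calculate_conflicts_fast s := by
  rw [A_eq_Osum, fast_eq_Ssum]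
  have hE : PySem.List.enumerate s 0
      = (PySem.List.pyRange 0 (s.length : Int) 1).map (fun j => (j, PySem.List.pyGetD s j 0)) := by
    simpa using PySem.List.enumerate_eq_map_pyRange s 0
  rw [hE]
  apply Osum_eq_Ssum
  rw [← hE]
  exact PySem.List.pairwise_lt_enumerate s 0

-- the 'keep the strictly smaller' pair loop computes (key of m, m) for the running first-minimum m
lemma sel_fold (f : List Int → Int) : ∀ (rest : List (List Int)) (x : List Int),
    rest.foldl (fun st succ => let conflicts := f succ; if conflicts < st.1 then (conflicts, succ) else st) (f x, x)
    = (f (rest.foldl (fun m y => if f y < f m then y else m) x),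
       rest.foldl (fun m y => if f y < f m then y else m) x) := by
  intro rest
  induction rest with
  | nil => intro x; rfl
  | cons y rest ih =>
    intro x
    simp only [List.foldl_cons]
    by_cases h : f y < f x <;> simp only [h, ite_true, ite_false, ih]

lemma min?_cons (f : List Int → Int) : ∀ (rest : List (List Int)) (x : List Int),
    PySem.List.min? (x :: rest) f = some (rest.foldl (fun m y => if f y < f m then y else m) x) := by
  intro rest
  induction rest with
  | nil => intro x; rfl
  | cons y rest ih =>
    intro x
    have step : PySem.List.min? (x :: y :: rest) f
        = PySem.List.min? ((if f y < f x then y else x) :: rest) f := by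
      simp only [PySem.List.min?, List.foldl_cons]
      congr 1
      by_cases h : f y < f x <;> simp [h]
    rw [step, ih]
    simp only [List.foldl_cons]

-- ===== VERDICT (by name: the statement is the Claim_ definition above) =====
theorem choose_best_successor_spec : Claim_equal_choose_best_successor := by
  intro successors _ hpre
  unfold Spec_choose_best_successor
  obtain ⟨x, rest, rfl⟩ : ∃ x rest, successors = x :: rest := by
    cases successors with
    | nil => exact absurd rfl hpre
    | cons x rest => exact ⟨x, rest, rfl⟩
  unfold choose_best_successor choose_best_successor_alt
  rw [PySem.List.slice_from_one]
  simp only [PySem.List.pyGetD_zero_cons, List.tail_cons]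
  rw [sel_fold, min?_cons]
  simp only [Option.getD_some]
  rw [PySem.List.foldl_congr_mem (g := fun m y =>
    if calculate_conflicts_fast y < calculate_conflicts_fast m then y else m)]
  intro m y _
  rw [conf_eq, conf_eq]
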